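-- pv_equiv track=rewrite | github.com/vc0489/V-basketball-sim | PossessionClass.py | generate_clutch_props_dict
-- ===== SOURCE A (Python) =====
-- def generate_clutch_props_dict(ranking):
--   prop_dict = {}
--   base_prop = 5
--   base_interval = 15
--   interval_change = 5
--
--   for i in range(len(ranking)):
--     prop_dict[ranking[i]] = base_prop
--     base_prop += base_interval
--     base_interval += interval_change
--   #print ('Prop dict:',prop_dict)
--   return (prop_dict)
-- ===== SOURCE B (Python) =====
-- def generate_clutch_props_dict(ranking):
--   # Closed form: the i-th assigned prop is 5 + 15*i + 5*i*(i-1)//2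
--   # (sum of base 5 plus intervals 15, 20, 25, ...). Same insertion order,
--   # so duplicate keys overwrite identically.
--   return {ranking[i]: 5 + 15*i + (5*i*(i-1))//2 for i in range(len(ranking))}
-- ===== Notes on version B (the rewrite author's own statement) =====
-- stated objective: simpler
-- what changed: Replaces the accumulating loop that carries base_prop/base_interval state with a one-line dict comprehension using the closed form 5 + 15*i + (5*i*(i-1))//2 per index.
import Mathlib
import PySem

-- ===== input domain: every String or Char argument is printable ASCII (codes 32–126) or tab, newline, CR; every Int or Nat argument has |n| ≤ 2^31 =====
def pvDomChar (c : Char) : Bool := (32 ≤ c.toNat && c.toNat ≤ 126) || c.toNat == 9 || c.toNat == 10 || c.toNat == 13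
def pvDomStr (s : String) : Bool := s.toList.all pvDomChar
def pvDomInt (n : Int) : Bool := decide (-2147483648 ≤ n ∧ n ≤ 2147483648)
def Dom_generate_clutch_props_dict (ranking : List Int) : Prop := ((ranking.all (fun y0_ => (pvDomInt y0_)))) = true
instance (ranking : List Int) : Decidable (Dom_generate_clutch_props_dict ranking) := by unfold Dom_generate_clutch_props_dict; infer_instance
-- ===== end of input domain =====

-- B replaces A's stateful accumulating loop with a closed-form value per index (simpler).

-- ===== PORT A =====
-- Loop state: (prop_dict, base_prop, base_interval); ranking[i] is always in range,
-- so pyGetD with default 0 is exact.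
def generate_clutch_props_dict (ranking : List Int) : List (Int × Int) :=
  let st :=
    (PySem.List.pyRange 0 ranking.length 1).foldl
      (fun (st : PySem.Dict Int Int × Int × Int) i =>
        (st.1.insert (PySem.List.pyGetD ranking i 0) st.2.1,
         st.2.1 + st.2.2, st.2.2 + 5))
      (PySem.Dict.empty, 5, 15)
  st.1.items

-- ===== PORT B =====
def generate_clutch_props_dict_alt (ranking : List Int) : List (Int × Int) :=
  ((PySem.List.pyRange 0 ranking.length 1).foldl
      (fun (d : PySem.Dict Int Int) i =>
        d.insert (PySem.List.pyGetD ranking i 0)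
          (5 + 15 * i + PySem.Int.floordiv (5 * i * (i - 1)) 2))
      PySem.Dict.empty).items

-- ===== PRECONDITION & SPEC =====
def Spec_generate_clutch_props_dict (ranking : List Int) (out : List (Int × Int)) : Prop := out = generate_clutch_props_dict_alt ranking
instance (ranking : List Int) (out : List (Int × Int)) : Decidable (Spec_generate_clutch_props_dict ranking out) := by unfold Spec_generate_clutch_props_dict; infer_instance

-- ===== CLAIM (what is proved, stated in full; the proofs are below) =====
def Claim_equal_generate_clutch_props_dict : Prop := ∀ (ranking : List Int), Dom_generate_clutch_props_dict ranking → Spec_generate_clutch_props_dict ranking (generate_clutch_props_dict ranking)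

-- ===== LEMMAS AND PROOFS =====

-- closed form for the running prop value
def pvProp (i : Int) : Int := 5 + 15 * i + PySem.Int.floordiv (5 * i * (i - 1)) 2

lemma pvProp_step (n : Nat) : pvProp ((n : Int) + 1) = pvProp n + (15 + 5 * n) := by
  unfold pvProp
  rw [PySem.Int.floordiv_eq_ediv_of_pos (by norm_num),
      PySem.Int.floordiv_eq_ediv_of_pos (by norm_num)]
  have h : (5 * ((n : Int) + 1) * ((n : Int) + 1 - 1)) = 5 * n * (n - 1) + 5 * n * 2 := by ring
  rw [h, Int.add_mul_ediv_right _ _ (by norm_num)]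
  ring

-- loop invariant: the dicts agree, and A's counters take the closed-form values
lemma pv_invariant (ranking : List Int) (n : Nat) :
    (PySem.List.pyRange 0 n 1).foldl
      (fun (st : PySem.Dict Int Int × Int × Int) i =>
        (st.1.insert (PySem.List.pyGetD ranking i 0) st.2.1,
         st.2.1 + st.2.2, st.2.2 + 5))
      (PySem.Dict.empty, 5, 15)
    = ((PySem.List.pyRange 0 n 1).foldl
        (fun (d : PySem.Dict Int Int) i =>
          d.insert (PySem.List.pyGetD ranking i 0)
            (5 + 15 * i + PySem.Int.floordiv (5 * i * (i - 1)) 2))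
        PySem.Dict.empty,
       pvProp n, 15 + 5 * (n : Int)) := by
  induction n with
  | zero => simp [PySem.List.pyRange_zero_nat, pvProp, PySem.Int.floordiv]
  | succ m ih =>
      have hr : PySem.List.pyRange 0 ((m : Int) + 1) 1
          = PySem.List.pyRange 0 m 1 ++ [(m : Int)] :=
        PySem.List.pyRange_one_succ_right (by positivity)
      have hcast : ((m + 1 : Nat) : Int) = (m : Int) + 1 := by push_cast; ring
      rw [hcast, hr, List.foldl_append, List.foldl_append, ih]
      simp only [List.foldl_cons, List.foldl_nil]
      refine Prod.ext rfl (Prod.ext ?_ ?_)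
      · show pvProp m + (15 + 5 * (m : Int)) = pvProp ((m : Int) + 1)
        rw [pvProp_step]
      · show 15 + 5 * (m : Int) + 5 = 15 + 5 * ((m : Int) + 1)
        ring

-- ===== VERDICT (by name: the statement is the Claim_ definition above) =====
theorem generate_clutch_props_dict_spec : Claim_equal_generate_clutch_props_dict := by
  intro ranking _
  unfold Spec_generate_clutch_props_dict generate_clutch_props_dict generate_clutch_props_dict_alt
  rw [pv_invariant ranking ranking.length]
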